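-- pv_equiv track=rewrite | github.com/ThisIsCosine/AlpsBench | scripts/add_selected_memory_id_task4_final.py | _norm_label
-- ===== SOURCE A (Python) =====
-- from typing import Any, Dict, Iterable, List, Optional, Tuple
--
-- def _norm_label(s: Any) -> str:
--     if s is None:
--         return ""
--     if not isinstance(s, str):
--         s = str(s)
--     s = s.strip().replace("\\", "/")
--     while "//" in s:
--         s = s.replace("//", "/")
--     return s.strip("/")
-- ===== SOURCE B (Python) =====
-- def _norm_label(s):
--     if s is None:
--         return ""
--     if not isinstance(s, str):
--         s = str(s)
--     s = s.strip().replace("\\", "/")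
--     return "/".join(p for p in s.split("/") if p)
-- ===== Notes on version B (the rewrite author's own statement) =====
-- stated objective: simpler
-- what changed: A's repeated-rescan loop that keeps replacing double slashes until none remain, followed by stripping boundary slashes, is replaced by a single tokenizing pass: split on the slash character, drop empty segments, and rejoin with a slash.
import Mathlib
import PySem

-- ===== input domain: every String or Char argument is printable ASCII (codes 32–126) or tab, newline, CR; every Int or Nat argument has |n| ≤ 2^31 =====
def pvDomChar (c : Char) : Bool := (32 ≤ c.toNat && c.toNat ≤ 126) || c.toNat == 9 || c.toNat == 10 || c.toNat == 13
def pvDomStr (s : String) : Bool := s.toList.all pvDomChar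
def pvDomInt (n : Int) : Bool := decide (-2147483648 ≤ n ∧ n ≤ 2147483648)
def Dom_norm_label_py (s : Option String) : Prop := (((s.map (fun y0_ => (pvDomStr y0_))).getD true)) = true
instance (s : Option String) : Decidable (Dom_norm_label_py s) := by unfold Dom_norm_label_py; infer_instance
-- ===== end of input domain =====

-- B replaces A's repeated collapse-double-slash loop plus boundary-slash strip by one split/filter/join pass (simpler).

-- ===== PORT A =====
-- the 'while "//" in s: s = s.replace("//","/")' loop; fuel = length is enough since each
-- replace that fires shrinks the string (the fuel guard only makes the same computation total)
def normLoopA : Nat → List Char → List Char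
  | 0, cs => cs
  | fuel+1, cs =>
    if PySem.Chars.isIn ['/', '/'] cs then
      normLoopA fuel (PySem.Chars.replace cs ['/', '/'] ['/'])
    else cs

def norm_label_py (s : Option String) : String :=
  match s with
  | none => ""
  | some s0 =>
    let cs := PySem.Chars.replace (PySem.Chars.strip s0.toList) ['\\'] ['/']
    String.mk (PySem.Chars.stripChars (normLoopA cs.length cs) ['/'])

-- ===== PORT B =====
def norm_label_py_alt (s : Option String) : String :=
  match s with
  | none => ""
  | some s0 =>
    let cs := PySem.Chars.replace (PySem.Chars.strip s0.toList) ['\\'] ['/']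
    String.mk (PySem.Chars.join ['/'] ((PySem.Chars.splitOn cs ['/']).filter (fun t => !t.isEmpty)))

-- ===== PRECONDITION & SPEC =====
def Spec_norm_label_py (s : Option String) (out : String) : Prop := out = norm_label_py_alt s
instance (s : Option String) (out : String) : Decidable (Spec_norm_label_py s out) := by unfold Spec_norm_label_py; infer_instance

-- ===== CLAIM (what is proved, stated in full; the proofs are below) =====
def Claim_equal_norm_label_py : Prop := ∀ (s : Option String), Dom_norm_label_py s → Spec_norm_label_py s (norm_label_py s)

-- ===== LEMMAS AND PROOFS =====

def rep1 : List Char → List Char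
  | '/' :: '/' :: t => '/' :: rep1 t
  | c :: t => c :: rep1 t
  | [] => []

theorem rep1_cons_cons (c d : Char) (t : List Char) :
    rep1 (c :: d :: t) = if c = '/' ∧ d = '/' then '/' :: rep1 t else c :: rep1 (d :: t) := by
  split
  · rename_i h; obtain ⟨rfl, rfl⟩ := h; rfl
  · rename_i h
    rw [rep1] <;> (intros; simp_all)

theorem replace_go_eq_rep1 : ∀ (fuel : Nat) (l acc : List Char), l.length ≤ fuel →
    PySem.Chars.replace.go ['/', '/'] ['/'] fuel l acc = acc.reverse ++ rep1 l := by
  intro fuel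
  induction fuel with
  | zero =>
    intro l acc h
    match l with
    | [] => simp [PySem.Chars.replace.go, rep1]
  | succ n ih =>
    intro l acc h
    match l with
    | [] => simp [PySem.Chars.replace.go, rep1]
    | [c] =>
      rw [PySem.Chars.replace.go]
      have hp : (['/', '/'] : List Char).isPrefixOf [c] = false := by
        simp [List.isPrefixOf]
      rw [hp]
      simp only [Bool.false_eq_true, if_false]
      rw [ih _ _ (by simp)]
      simp [rep1]
    | c :: d :: t =>
      rw [PySem.Chars.replace.go, rep1_cons_cons]
      by_cases hcd : c = '/' ∧ d = '/'
      · obtain ⟨rfl, rfl⟩ := hcd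
        have hp : (['/', '/'] : List Char).isPrefixOf ('/' :: '/' :: t) = true := by
          simp [List.isPrefixOf]
        rw [hp, if_pos rfl, if_pos ⟨rfl, rfl⟩]
        rw [ih _ _ (by simp at h ⊢; omega)]
        simp
      · have hp : (['/', '/'] : List Char).isPrefixOf (c :: d :: t) = false := by
          simp [List.isPrefixOf]; tauto
        rw [hp]
        simp only [Bool.false_eq_true, if_false, if_neg hcd]
        rw [ih _ _ (by simp at h ⊢; omega)]
        simp

theorem replace_dd_eq_rep1 (cs : List Char) :
    PySem.Chars.replace cs ['/', '/'] ['/'] = rep1 cs := by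
  rw [PySem.Chars.replace]
  simp only [List.isEmpty_cons, Bool.false_eq_true, if_false]
  rw [replace_go_eq_rep1 _ _ _ le_rfl]
  rfl

def dd : List Char → Bool
  | '/' :: '/' :: _ => true
  | _ :: t => dd t
  | [] => false

theorem dd_cons_cons (c d : Char) (t : List Char) :
    dd (c :: d :: t) = if c = '/' ∧ d = '/' then true else dd (d :: t) := by
  split
  · rename_i h; obtain ⟨rfl, rfl⟩ := h; rfl
  · rw [dd] <;> (intros; simp_all)

theorem dd_iff_infix (cs : List Char) : dd cs = true ↔ (['/', '/'] : List Char) <:+: cs := by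
  induction cs with
  | nil => simp [dd]
  | cons c t ih =>
    match t with
    | [] =>
      simp only [dd]
      constructor
      · intro h; simp [dd] at h
      · intro h
        have := h.length_le; simp at this
    | d :: t2 =>
      rw [dd_cons_cons, List.infix_cons_iff]
      by_cases hcd : c = '/' ∧ d = '/'
      · obtain ⟨rfl, rfl⟩ := hcd
        have hpre : (['/', '/'] : List Char) <+: '/' :: '/' :: t2 := ⟨t2, rfl⟩
        simp [hpre]
      · rw [if_neg hcd, ih]
        constructor
        · exact Or.inr
        · rintro (hpre | h)
          · exfalso
            obtain ⟨r, hr⟩ := hpre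
            simp at hr
            obtain ⟨rfl, rfl, -⟩ := hr
            exact hcd ⟨rfl, rfl⟩
          · exact h

theorem dd_eq_isIn (cs : List Char) : PySem.Chars.isIn ['/', '/'] cs = dd cs := by
  cases hdd : dd cs
  · rw [PySem.Chars.isIn_eq_false_iff]
    rw [← dd_iff_infix, hdd]
    simp
  · rw [(PySem.Chars.isIn_iff_infix _ _).2 ((dd_iff_infix _).1 hdd)]

theorem rep1_length_le (cs : List Char) : (rep1 cs).length ≤ cs.length := by
  fun_induction rep1 <;> simp_all <;> omega

theorem rep1_length_lt (cs : List Char) (h : dd cs = true) : (rep1 cs).length < cs.length := by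
  fun_induction rep1 with
  | case1 t ih =>
    have := rep1_length_le t
    simp; omega
  | case2 c t hne ih =>
    match t with
    | [] => simp [dd] at h
    | d :: t2 =>
      rw [dd_cons_cons] at h
      have hcd : ¬(c = '/' ∧ d = '/') := by
        rintro ⟨rfl, rfl⟩
        exact hne t2 rfl rfl
      rw [if_neg hcd] at h
      have := ih h
      simp only [List.length_cons] at this ⊢
      omega
  | case3 => simp [dd] at h

def split1 : List Char → List Char × List (List Char)
  | [] => ([], [])
  | '/' :: t => ([], (split1 t).1 :: (split1 t).2)
  | c :: t => (c :: (split1 t).1, (split1 t).2)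

theorem split1_cons (c : Char) (t : List Char) :
    split1 (c :: t) = if c = '/' then ([], (split1 t).1 :: (split1 t).2)
      else (c :: (split1 t).1, (split1 t).2) := by
  split
  · rename_i h; subst h; rfl
  · rw [split1] <;> (intros; simp_all)

def tokl (x : List Char) : List (List Char) :=
  ((split1 x).1 :: (split1 x).2).filter (fun t => !t.isEmpty)

theorem split1_rep1 (cs : List Char) :
    (split1 (rep1 cs)).1 = (split1 cs).1 ∧
    (split1 (rep1 cs)).2.filter (fun t => !t.isEmpty) = (split1 cs).2.filter (fun t => !t.isEmpty) := by
  fun_induction rep1 with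
  | case1 t ih =>
    constructor
    · simp [split1]
    · simp only [split1, List.filter_cons]
      rw [ih.1, ih.2]
      simp
  | case2 c t hne ih =>
    rw [split1_cons, split1_cons]
    by_cases hc : c = '/'
    · subst hc
      rw [if_pos rfl, if_pos rfl]
      refine ⟨rfl, ?_⟩
      simp only [List.filter_cons]
      rw [ih.1, ih.2]
    · simp only [if_neg hc]
      exact ⟨by rw [ih.1], ih.2⟩
  | case3 => exact ⟨rfl, rfl⟩

theorem tokl_rep1 (cs : List Char) : tokl (rep1 cs) = tokl cs := by
  unfold tokl
  simp only [List.filter_cons]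
  rw [(split1_rep1 cs).1, (split1_rep1 cs).2]

theorem normLoopA_spec : ∀ (n : Nat) (cs : List Char), cs.length ≤ n →
    dd (normLoopA n cs) = false ∧ tokl (normLoopA n cs) = tokl cs := by
  intro n
  induction n with
  | zero =>
    intro cs h
    have : cs = [] := by
      cases cs with
      | nil => rfl
      | cons a t => simp at h
    subst this
    exact ⟨rfl, rfl⟩
  | succ m ih =>
    intro cs h
    rw [normLoopA]
    cases hdd : dd cs with
    | false => rw [dd_eq_isIn, hdd]; simp [hdd]
    | true =>
      rw [dd_eq_isIn, hdd]
      rw [if_pos rfl]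
      rw [replace_dd_eq_rep1]
      have hlt := rep1_length_lt cs hdd
      obtain ⟨h1, h2⟩ := ih (rep1 cs) (by omega)
      exact ⟨h1, by rw [h2, tokl_rep1]⟩

theorem splitOn_go_eq_split1 : ∀ (fuel : Nat) (l cur : List Char) (acc : List (List Char)),
    l.length < fuel →
    PySem.Chars.splitOn.go ['/'] fuel l cur acc =
      acc.reverse ++ (cur.reverse ++ (split1 l).1) :: (split1 l).2 := by
  intro fuel
  induction fuel with
  | zero => intro l cur acc h; omega
  | succ n ih =>
    intro l cur acc h
    match l with
    | [] => simp [PySem.Chars.splitOn.go, split1]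
    | c :: t =>
      rw [PySem.Chars.splitOn.go, split1_cons]
      by_cases hc : c = '/'
      · subst hc
        have hp : (['/'] : List Char).isPrefixOf ('/' :: t) = true := by
          simp [List.isPrefixOf]
        rw [hp, if_pos rfl, if_pos rfl]
        rw [ih _ _ _ (by simp at h ⊢; omega)]
        simp
      · have hp : (['/'] : List Char).isPrefixOf (c :: t) = false := by
          simp [List.isPrefixOf]
          exact fun h' => hc h'.symm
        rw [hp]
        simp only [Bool.false_eq_true, if_false, if_neg hc]
        rw [ih _ _ _ (by simp at h ⊢; omega)]
        simp

theorem splitOn_eq_split1 (cs : List Char) :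
    PySem.Chars.splitOn cs ['/'] = (split1 cs).1 :: (split1 cs).2 := by
  rw [PySem.Chars.splitOn, splitOn_go_eq_split1 _ _ _ _ (by omega)]
  rfl

def myRstrip : List Char → List Char
  | [] => []
  | c :: t => if c == '/' && (myRstrip t).isEmpty then [] else c :: myRstrip t

theorem myRstrip_eq (s : List Char) :
    myRstrip s = (List.dropWhile (fun c => (['/'] : List Char).contains c) s.reverse).reverse := by
  induction s with
  | nil => rfl
  | cons c t ih =>
    rw [myRstrip, ih]
    simp only [List.reverse_cons, List.dropWhile_append]
    by_cases he : (List.dropWhile (fun c => (['/'] : List Char).contains c) t.reverse).isEmpty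
    · rw [if_pos he]
      have hmt : (myRstrip t).isEmpty = true := by
        rw [ih]; simpa using he
      have hmt' : myRstrip t = [] := List.isEmpty_iff.mp hmt
      rw [ih] at hmt'
      have hall : ∀ x ∈ t, x = '/' := by
        have h2 := List.dropWhile_eq_nil_iff.mp (List.isEmpty_iff.mp he)
        intro x hx
        have := h2 x (by simpa using hx)
        simpa using this
      by_cases hc : c = '/'
      · subst hc
        simp [hmt, List.dropWhile, ih, hmt']
        exact hall
      · simp [List.dropWhile, hc, ih, hmt']
        exact hall
    · rw [if_neg he]
      simp only [List.isEmpty_reverse, he, Bool.and_false, Bool.false_eq_true, if_false]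
      simp

def myJoin : List (List Char) → List Char
  | [] => []
  | [x] => x
  | x :: y :: l => x ++ '/' :: myJoin (y :: l)

theorem myJoin_eq (l : List (List Char)) : myJoin l = List.intercalate ['/'] l := by
  fun_induction myJoin <;> simp_all [List.intercalate, List.intersperse]

theorem dd_cons_false {c : Char} {t : List Char} (h : dd (c :: t) = false) : dd t = false := by
  match t with
  | [] => rfl
  | d :: t2 =>
    rw [dd_cons_cons] at h
    split at h
    · exact absurd h (by simp)
    · exact h

theorem dd_slash_head {u : List Char} (h : dd ('/' :: u) = false) :
    u = [] ∨ ∃ c v, u = c :: v ∧ c ≠ '/' := by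
  match u with
  | [] => exact Or.inl rfl
  | c :: v =>
    refine Or.inr ⟨c, v, rfl, ?_⟩
    rintro rfl
    rw [dd_cons_cons] at h
    simp at h

theorem myRstrip_Q : ∀ (t : List Char), dd t = false →
    myRstrip t = myJoin ((split1 t).1 :: (split1 t).2.filter (fun x => !x.isEmpty)) := by
  intro t
  induction t with
  | nil => intro _; rfl
  | cons c u ih =>
    intro h
    have hu := dd_cons_false h
    rw [split1_cons, myRstrip]
    by_cases hc : c = '/'
    · subst hc
      rw [if_pos rfl]
      simp only
      rcases dd_slash_head h with rfl | ⟨d, v, rfl, hd⟩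
      · rfl
      · have hmu : myRstrip (d :: v) ≠ [] := by
          rw [myRstrip]
          simp [hd]
        rw [ih hu] at hmu ⊢
        rw [if_neg (by simp [List.isEmpty_iff, hmu])]
        rw [split1_cons, if_neg hd]
        simp only [List.filter_cons]
        rw [split1_cons, if_neg hd] at hmu
        simp only at hmu
        simp only [List.isEmpty_cons, Bool.not_false, if_pos rfl]
        rfl
    · rw [if_neg hc, ih hu]
      simp only [Bool.and_eq_true, beq_iff_eq]
      rw [if_neg (by rintro ⟨h1, -⟩; exact hc h1)]
      rcases hsp : (split1 u).2.filter (fun x => !x.isEmpty) with _ | ⟨y, l⟩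
      · rw [hsp]
        simp [myJoin]
      · rw [hsp]
        rfl

theorem tokl_slash (u : List Char) : tokl ('/' :: u) = tokl u := by
  unfold tokl
  rw [split1_cons, if_pos rfl]
  simp [List.filter_cons]

theorem Qhead (x : List Char) (hd : dd x = false) (hx : x = [] ∨ ∃ c v, x = c :: v ∧ c ≠ '/') :
    myRstrip x = myJoin (tokl x) := by
  rcases hx with rfl | ⟨c, v, rfl, hc⟩
  · rfl
  · rw [myRstrip_Q _ hd]
    unfold tokl
    rw [split1_cons, if_neg hc]
    simp [List.filter_cons]

theorem strip_eq_tokl (r : List Char) (h : dd r = false) :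
    PySem.Chars.stripChars r ['/'] = List.intercalate ['/'] (tokl r) := by
  rw [← myJoin_eq]
  have key : PySem.Chars.stripChars r ['/'] =
      myRstrip (List.dropWhile (fun c => (['/'] : List Char).contains c) r) := by
    rw [myRstrip_eq]
    rfl
  rw [key]
  cases r with
  | nil => rfl
  | cons a u =>
    by_cases ha : a = '/'
    · subst ha
      have hu := dd_cons_false h
      rcases dd_slash_head h with rfl | ⟨c, v, rfl, hc⟩
      · rfl
      · have hstep : List.dropWhile (fun c => (['/'] : List Char).contains c) ('/' :: c :: v) = c :: v := by
          simp [List.dropWhile, hc]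
        rw [hstep, tokl_slash]
        exact Qhead _ hu (Or.inr ⟨c, v, rfl, hc⟩)
    · have hstep : List.dropWhile (fun c => (['/'] : List Char).contains c) (a :: u) = a :: u := by
        simp [List.dropWhile, ha]
      rw [hstep]
      exact Qhead _ h (Or.inr ⟨a, u, rfl, ha⟩)

-- ===== VERDICT (by name: the statement is the Claim_ definition above) =====
theorem norm_label_py_spec : Claim_equal_norm_label_py := by
  intro s _
  unfold Spec_norm_label_py norm_label_py norm_label_py_alt
  match s with
  | none => rfl
  | some s0 =>
    simp only
    set cs := PySem.Chars.replace (PySem.Chars.strip s0.toList) ['\\'] ['/'] with hcs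
    obtain ⟨h1, h2⟩ := normLoopA_spec cs.length cs le_rfl
    rw [strip_eq_tokl _ h1, h2, splitOn_eq_split1]
    rfl
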